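-- pv_equiv track=rewrite | github.com/herbi1411/programmers | 모든문제/괄호 변환/괄호 변환.py | find_end_pair
-- ===== SOURCE A (Python) =====
-- def find_end_pair(p, now):
--     temp = 0
--     rt = now
--     for (i, val) in enumerate(p[now:]):
--         if val == '(':
--             temp += 1
--         elif val == ')':
--             temp -= 1
--         if i != 0 and temp == 0:
--             rt = i + now
--             break
--     return rt
-- ===== SOURCE B (Python) =====
-- def find_end_pair(p, now):
--     seg = p[now:]
--     balances = []
--     t = 0
--     for c in seg:
--         t += (c == '(') - (c == ')')
--         balances.append(t)
--     for i in range(1, len(balances)):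
--         if balances[i] == 0:
--             return now + i
--     return now
-- ===== Notes on version B (the rewrite author's own statement) =====
-- stated objective: alternative
-- what changed: B splits A's single fused loop (running balance + early break into a result variable) into two passes: first build the full cumulative balance table over p[now:], then scan that table from index 1 for the first zero, returning early.
import Mathlib
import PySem

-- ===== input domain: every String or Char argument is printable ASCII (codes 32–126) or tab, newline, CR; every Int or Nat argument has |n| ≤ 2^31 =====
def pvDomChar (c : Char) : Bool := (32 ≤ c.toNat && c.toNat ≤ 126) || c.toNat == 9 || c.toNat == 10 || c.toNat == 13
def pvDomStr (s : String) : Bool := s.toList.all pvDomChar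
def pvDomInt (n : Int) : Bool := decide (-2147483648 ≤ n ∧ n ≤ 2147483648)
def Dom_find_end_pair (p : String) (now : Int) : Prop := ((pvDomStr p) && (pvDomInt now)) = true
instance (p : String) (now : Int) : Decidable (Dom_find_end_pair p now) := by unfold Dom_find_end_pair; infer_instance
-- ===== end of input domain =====

-- B rebuilds A's fused scan as two passes (balance table, then a search for the first zero at index ≥ 1); same cost, different decomposition.

-- ===== PORT A =====
-- A's for-loop over enumerate(p[now:]) with early break: recursion carrying (i, temp);
-- returns some (i + now) at the break, none when the loop runs out (then rt = now).
def pvA_loop (l : List Char) (i temp now : Int) : Option Int :=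
  match l with
  | [] => none
  | c :: rest =>
    let temp' := if c = '(' then temp + 1 else if c = ')' then temp - 1 else temp
    if i ≠ 0 ∧ temp' = 0 then some (i + now)
    else pvA_loop rest (i + 1) temp' now

def find_end_pair (p : String) (now : Int) : Int :=
  (pvA_loop (PySem.List.slice p.toList (some now) none) 0 0 now).getD now

-- ===== PORT B =====
-- pass 1 of Source B: the cumulative balance table over seg (t += (c=='(') - (c==')'))
def pvB_balances (l : List Char) (t : Int) : List Int :=
  match l with
  | [] => []
  | c :: rest =>
    let t' := t + (if c = '(' then 1 else 0) - (if c = ')' then 1 else 0)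
    t' :: pvB_balances rest t'

-- pass 2 of Source B: 'for i in range(1, len(balances)): if balances[i] == 0: return now + i'
-- as recursion over balances.drop 1 with the running index i (starting at 1).
def pvB_search (bal : List Int) (i now : Int) : Option Int :=
  match bal with
  | [] => none
  | b :: rest => if b = 0 then some (now + i) else pvB_search rest (i + 1) now

def find_end_pair_alt (p : String) (now : Int) : Int :=
  let seg := PySem.List.slice p.toList (some now) none
  let balances := pvB_balances seg 0
  (pvB_search (balances.drop 1) 1 now).getD now

-- ===== PRECONDITION & SPEC =====
def Spec_find_end_pair (p : String) (now : Int) (out : Int) : Prop := out = find_end_pair_alt p now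
instance (p : String) (now : Int) (out : Int) : Decidable (Spec_find_end_pair p now out) := by unfold Spec_find_end_pair; infer_instance

-- ===== CLAIM (what is proved, stated in full; the proofs are below) =====
def Claim_equal_find_end_pair : Prop := ∀ (p : String) (now : Int), Dom_find_end_pair p now → Spec_find_end_pair p now (find_end_pair p now)

-- ===== LEMMAS AND PROOFS =====

-- A's per-step update equals B's per-step update.
lemma pv_step_eq (c : Char) (t : Int) :
    (if c = '(' then t + 1 else if c = ')' then t - 1 else t)
      = t + (if c = '(' then 1 else 0) - (if c = ')' then 1 else 0) := by
  by_cases h1 : c = '('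
  · subst h1; simp
  · by_cases h2 : c = ')' <;> simp [h1, h2]

-- Core invariant: for i ≥ 1, A's remaining loop equals B's search over the
-- remaining balance table built from the same running balance t.
lemma pv_loop_eq_search (l : List Char) (i t now : Int) (hi : 1 ≤ i) :
    pvA_loop l i t now = pvB_search (pvB_balances l t) i now := by
  induction l generalizing i t with
  | nil => rfl
  | cons c rest ih =>
    simp only [pvA_loop, pvB_balances, pvB_search, ← pv_step_eq c t]
    set t' := (if c = '(' then t + 1 else if c = ')' then t - 1 else t) with ht'
    by_cases hz : t' = 0
    · have : i ≠ 0 := by omega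
      simp [hz, this, Int.add_comm]
    · have hne : i ≠ 0 := by omega
      simp only [hz, and_false, if_false]
      exact ih (i + 1) t' (by omega)

-- First iteration (i = 0): A's guard is off; this unfolds both sides to the invariant.
lemma pv_main (seg : List Char) (now : Int) :
    (pvA_loop seg 0 0 now).getD now
      = (pvB_search ((pvB_balances seg 0).drop 1) 1 now).getD now := by
  cases seg with
  | nil => rfl
  | cons c rest =>
    simp only [pvA_loop, pvB_balances, ← pv_step_eq c 0, List.drop_one, List.tail_cons]
    have h0 : ¬ ((0 : Int) ≠ 0 ∧ (if c = '(' then (0:Int) + 1 else if c = ')' then 0 - 1 else 0) = 0) := by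
      intro h; exact h.1 rfl
    rw [if_neg h0, show (0:Int) + 1 = 1 from rfl, pv_loop_eq_search rest 1 _ now le_rfl]

-- ===== VERDICT (by name: the statement is the Claim_ definition above) =====
theorem find_end_pair_spec : Claim_equal_find_end_pair := by
  intro p now _
  unfold Spec_find_end_pair find_end_pair find_end_pair_alt
  exact pv_main _ now
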